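-- pv_equiv track=rewrite | github.com/renukadeshmukh/Leetcode_Solutions | 1394_FindLuckyIntegerinanArray.py | findLucky
-- ===== SOURCE A (Python) =====
-- from collections import defaultdict
--
-- def findLucky(arr):
--     """
--     :type arr: List[int]
--     :rtype: int
--     """
--     store = defaultdict(int)
--
--     for a in arr:
--         store[a] += 1
--
--     lucky = -1
--     for k in store:
--         if k == store[k]:
--             lucky = max(lucky, k)
--     return lucky
-- ===== SOURCE B (Python) =====
-- def findLucky(arr):
--     """
--     :type arr: List[int]
--     :rtype: int
--     """
--     s = sorted(arr)
--     n = len(s)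
--     best = -1
--     i = 0
--     while i < n:
--         j = i
--         while j < n and s[j] == s[i]:
--             j += 1
--         if s[i] == j - i:
--             best = max(best, s[i])
--         i = j
--     return best
-- ===== Notes on version B (the rewrite author's own statement) =====
-- stated objective: alternative
-- what changed: Replaced the defaultdict frequency table plus key scan by sorting a copy of the list and walking consecutive equal runs, keeping the maximum value whose run length equals it.
import Mathlib
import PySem

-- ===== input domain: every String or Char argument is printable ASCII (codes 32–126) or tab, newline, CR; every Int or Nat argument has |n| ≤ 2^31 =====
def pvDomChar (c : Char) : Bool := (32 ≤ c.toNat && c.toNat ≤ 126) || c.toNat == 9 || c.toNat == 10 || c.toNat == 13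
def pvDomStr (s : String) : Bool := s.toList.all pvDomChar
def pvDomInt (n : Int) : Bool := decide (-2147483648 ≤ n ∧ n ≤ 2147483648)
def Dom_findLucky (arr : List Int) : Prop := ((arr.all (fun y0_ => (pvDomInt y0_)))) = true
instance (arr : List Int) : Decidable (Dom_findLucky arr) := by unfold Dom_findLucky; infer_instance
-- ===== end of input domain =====

-- B replaces the frequency dict + key scan by sort-a-copy then a single walk over equal runs (alternative decomposition, no speed claim).

-- ===== PORT A =====
def findLucky (arr : List Int) : Int :=
  -- store = defaultdict(int); for a in arr: store[a] += 1
  let store := arr.foldl (fun d a => d.modify a 0 (· + 1)) (PySem.Dict.empty : PySem.Dict Int Int)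
  -- lucky = -1; for k in store: if k == store[k]: lucky = max(lucky, k)
  store.keys.foldl (fun lucky k => if k = store.getD k 0 then max lucky k else lucky) (-1)

-- ===== PORT B =====
-- outer while: each step consumes one run (inner while = takeWhile/dropWhile over the run)
def findLuckyRuns : List Int → Int → Int
  | [], best => best
  | x :: rest, best =>
      let cnt : Int := 1 + (rest.takeWhile (fun y => y == x)).length
      let best' := if x = cnt then max best x else best
      findLuckyRuns (rest.dropWhile (fun y => y == x)) best'
termination_by s _ => s.length
decreasing_by
  simpa using Nat.lt_succ_of_le (List.length_dropWhile_le _ _)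

def findLucky_alt (arr : List Int) : Int :=
  findLuckyRuns (PySem.List.sorted arr (fun x => x) false) (-1)

-- ===== PRECONDITION & SPEC =====
def Spec_findLucky (arr : List Int) (out : Int) : Prop := out = findLucky_alt arr
instance (arr : List Int) (out : Int) : Decidable (Spec_findLucky arr out) := by unfold Spec_findLucky; infer_instance

-- ===== CLAIM (what is proved, stated in full; the proofs are below) =====
def Claim_equal_findLucky : Prop := ∀ (arr : List Int), Dom_findLucky arr → Spec_findLucky arr (findLucky arr)

-- ===== LEMMAS AND PROOFS =====

-- the distinct values of a sorted list, in run order (proof-only helper)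
def runHeads : List Int → List Int
  | [] => []
  | x :: rest => x :: runHeads (rest.dropWhile (fun y => y == x))
termination_by s => s.length
decreasing_by
  simpa using Nat.lt_succ_of_le (List.length_dropWhile_le _ _)

-- the lucky-folding step both programs perform, with the counting list factored out
def luckyStep (cnt : Int → Int) (l k : Int) : Int :=
  if k = cnt k then max l k else l

theorem runHeads_subset : ∀ (s : List Int) (k : Int), k ∈ runHeads s → k ∈ s := by
  intro s
  induction s using runHeads.induct with
  | case1 => intro k hk; simp [runHeads] at hk
  | case2 x rest ih =>
    intro k hk
    rw [runHeads] at hk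
    rcases List.mem_cons.mp hk with h | h
    · simp [h]
    · exact List.mem_cons_of_mem _ ((List.dropWhile_sublist _).mem (ih k h))

-- in a sorted list x :: rest, the leading run of x's is ALL of the x's
theorem run_split : ∀ (x : Int) (rest : List Int), (x :: rest).Pairwise (· ≤ ·) →
    (rest.takeWhile (fun y => y == x)).length = rest.count x ∧
    x ∉ rest.dropWhile (fun y => y == x) := by
  intro x rest
  induction rest with
  | nil => intro _; simp
  | cons y t ih =>
    intro hp
    rcases List.pairwise_cons.mp hp with ⟨hx, hyt⟩
    by_cases hxy : y = x
    · subst hxy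
      have hp' : (y :: t).Pairwise (· ≤ ·) := by
        refine List.pairwise_cons.mpr ⟨?_, (List.pairwise_cons.mp hyt).2⟩
        intro a ha; exact hx a (List.mem_cons_of_mem _ ha)
      have := ih hp'
      constructor
      · simp [this.1]
      · simpa using this.2
    · have hnot : x ∉ y :: t := by
        intro hmem
        rcases List.mem_cons.mp hmem with h | h
        · exact hxy h.symm
        · have h1 : x ≤ y := hx y (List.mem_cons_self)
          have h2 : y ≤ x := (List.pairwise_cons.mp hyt).1 x h
          exact hxy (le_antisymm h2 h1)
      constructor
      · simp [hxy, List.count_eq_zero.mpr hnot]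
      · simpa [List.dropWhile_cons, hxy] using hnot

theorem mem_runHeads : ∀ (s : List Int), s.Pairwise (· ≤ ·) → ∀ k, k ∈ s → k ∈ runHeads s := by
  intro s
  induction s using runHeads.induct with
  | case1 => intro _ k hk; simp at hk
  | case2 x rest ih =>
    intro hp k hk
    rw [runHeads]
    by_cases hkx : k = x
    · simp [hkx]
    · right
      have hkrest : k ∈ rest := by
        rcases List.mem_cons.mp hk with h | h
        · exact absurd h hkx
        · exact h
      have hsplit : rest.takeWhile (fun y => y == x) ++ rest.dropWhile (fun y => y == x) = rest :=
        List.takeWhile_append_dropWhile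
      have hkdrop : k ∈ rest.dropWhile (fun y => y == x) := by
        rw [← hsplit] at hkrest
        rcases List.mem_append.mp hkrest with h | h
        · have := List.mem_takeWhile_imp h
          simp at this
          exact absurd this hkx
        · exact h
      have hp' : (rest.dropWhile (fun y => y == x)).Pairwise (· ≤ ·) :=
        List.Pairwise.sublist (List.dropWhile_sublist _) (List.pairwise_cons.mp hp).2
      exact ih hp' k hkdrop

theorem nodup_runHeads : ∀ (s : List Int), s.Pairwise (· ≤ ·) → (runHeads s).Nodup := by
  intro s
  induction s using runHeads.induct with
  | case1 => intro _; simp [runHeads]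
  | case2 x rest ih =>
    intro hp
    rw [runHeads]
    have hp' : (rest.dropWhile (fun y => y == x)).Pairwise (· ≤ ·) :=
      List.Pairwise.sublist (List.dropWhile_sublist _) (List.pairwise_cons.mp hp).2
    refine List.nodup_cons.mpr ⟨?_, ih hp'⟩
    intro hmem
    exact (run_split x rest hp).2 (runHeads_subset _ _ hmem)

-- run-walking over a sorted list = the lucky fold over its distinct values, counted in s
theorem runs_char : ∀ (s : List Int), s.Pairwise (· ≤ ·) → ∀ best,
    findLuckyRuns s best = (runHeads s).foldl (luckyStep (fun k => (s.count k : Int))) best := by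
  intro s
  induction s using runHeads.induct with
  | case1 => intro _ best; simp [findLuckyRuns, runHeads]
  | case2 x rest ih =>
    intro hp best
    have hsp := run_split x rest hp
    have htail : rest.Pairwise (· ≤ ·) := (List.pairwise_cons.mp hp).2
    have hp' : (rest.dropWhile (fun y => y == x)).Pairwise (· ≤ ·) :=
      List.Pairwise.sublist (List.dropWhile_sublist _) htail
    rw [findLuckyRuns, runHeads]
    have hcnt : (1 + ((rest.takeWhile (fun y => y == x)).length : Int)) = ((x :: rest).count x : Int) := by
      rw [hsp.1]; simp; omega
    have hcount : ∀ k ∈ runHeads (rest.dropWhile (fun y => y == x)),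
        ((rest.dropWhile (fun y => y == x)).count k : Int) = ((x :: rest).count k : Int) := by
      intro k hk
      have hkdrop := runHeads_subset _ _ hk
      have hkx : k ≠ x := by
        intro h; subst h; exact hsp.2 hkdrop
      have hsplit : rest.takeWhile (fun y => y == x) ++ rest.dropWhile (fun y => y == x) = rest :=
        List.takeWhile_append_dropWhile
      have htw : (rest.takeWhile (fun y => y == x)).count k = 0 := by
        refine List.count_eq_zero.mpr ?_
        intro hmem
        have := List.mem_takeWhile_imp hmem
        simp at this
        exact hkx this
      have : rest.count k = (rest.takeWhile (fun y => y == x)).count k +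
          (rest.dropWhile (fun y => y == x)).count k := by
        conv_lhs => rw [← hsplit]
        exact List.count_append
      have hxk : ¬ x = k := fun h => hkx h.symm
      simp [hxk, this, htw]
    rw [ih hp']
    simp only [List.foldl_cons]
    have hstep : luckyStep (fun k => ((x :: rest).count k : Int)) best x =
        (if x = 1 + ((rest.takeWhile (fun y => y == x)).length : Int) then max best x else best) := by
      simp only [luckyStep, hcnt]
    rw [← hstep]
    exact PySem.List.foldl_congr_mem' _
      (luckyStep (fun k => ((rest.dropWhile (fun y => y == x)).count k : Int)))
      (luckyStep (fun k => ((x :: rest).count k : Int))) _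
      (fun k hk acc => by simp only [luckyStep, hcount k hk])

-- the lucky fold is right-commutative, so its result is permutation-invariant
theorem luckyStep_rcomm (cnt : Int → Int) : ∀ (b a₁ a₂ : Int),
    luckyStep cnt (luckyStep cnt b a₁) a₂ = luckyStep cnt (luckyStep cnt b a₂) a₁ := by
  intro b a₁ a₂
  unfold luckyStep
  split_ifs <;> simp [max_comm, max_left_comm]

-- A's result, expressed through Counter lemmas
theorem portA_char (arr : List Int) :
    findLucky arr = (PySem.Set.ofList arr).foldl (luckyStep (fun k => (arr.count k : Int))) (-1) := by
  unfold findLucky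
  rw [← PySem.Dict.counter_eq_foldl]
  simp only [PySem.Dict.keys_counter, PySem.Dict.getD_counter]
  rfl

-- ===== VERDICT (by name: the statement is the Claim_ definition above) =====
theorem findLucky_spec : Claim_equal_findLucky := by
  intro arr _
  unfold Spec_findLucky findLucky_alt
  set s := PySem.List.sorted arr (fun x => x) false with hs
  have hperm : s.Perm arr := PySem.List.sorted_perm arr (fun x => x) false
  have hsorted : s.Pairwise (· ≤ ·) := PySem.List.sorted_pairwise arr (fun x => x)
  rw [portA_char, runs_char s hsorted]
  have hcnteq : ∀ k : Int, s.count k = arr.count k := fun k => hperm.count_eq k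
  have hfun : (luckyStep (fun k => (s.count k : Int))) = (luckyStep (fun k => (arr.count k : Int))) := by
    funext l k; simp [luckyStep, hcnteq k]
  rw [hfun]
  have hpermHeads : (runHeads s).Perm (PySem.Set.ofList arr) := by
    refine (List.perm_ext_iff_of_nodup (nodup_runHeads s hsorted) (PySem.Set.nodup_ofList arr)).mpr ?_
    intro a
    rw [PySem.Set.mem_ofList]
    constructor
    · intro h; exact hperm.mem_iff.mp (runHeads_subset s a h)
    · intro h; exact mem_runHeads s hsorted a (hperm.mem_iff.mpr h)
  exact (@List.Perm.foldl_eq _ _ _ _ _ ⟨luckyStep_rcomm _⟩ hpermHeads (-1)).symm
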